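-- pv_equiv track=rewrite | github.com/VishnuGopireddy/Data-Structures-and-Algorithms | Bit Magic/ismultipleofThree.py | ismultipleofThree
-- ===== SOURCE A (Python) =====
-- def ismultipleofThree(arr):
--     even = arr[1::2]
--     odd = arr[::2]
--     even = [int(i) for i in even]
--     odd = [int(i) for i in odd]
--     if abs(sum(even)-sum(odd)) % 3 == 0:
--         return 1
--     else:
--         return 0
-- ===== SOURCE B (Python) =====
-- def ismultipleofThree(arr):
--     # simpler: one accumulator pass instead of two slices, two maps and two sums
--     total = 0
--     for i, x in enumerate(arr):
--         if i % 2 == 1: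
--             total += int(x)
--         else:
--             total -= int(x)
--     return 1 if total % 3 == 0 else 0
-- ===== Notes on version B (the rewrite author's own statement) =====
-- stated objective: simpler
-- what changed: Replaced the two step-2 slices, two int() list comprehensions, two sums and abs by a single enumerate loop keeping one signed accumulator, using that divisibility by 3 is sign-independent.
import Mathlib
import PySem

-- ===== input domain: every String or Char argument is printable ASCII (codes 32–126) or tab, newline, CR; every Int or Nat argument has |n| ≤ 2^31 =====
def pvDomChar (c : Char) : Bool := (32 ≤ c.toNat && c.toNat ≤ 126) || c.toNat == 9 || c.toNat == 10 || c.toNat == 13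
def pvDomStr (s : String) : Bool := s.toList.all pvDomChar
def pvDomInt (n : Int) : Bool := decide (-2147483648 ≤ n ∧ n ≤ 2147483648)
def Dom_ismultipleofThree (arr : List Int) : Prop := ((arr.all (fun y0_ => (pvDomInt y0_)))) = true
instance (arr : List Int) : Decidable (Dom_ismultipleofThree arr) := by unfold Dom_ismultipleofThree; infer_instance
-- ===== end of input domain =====

-- B replaces A's two step-2 slices / two maps / two sums / abs by one signed-accumulator pass over enumerate (simpler; same O(n)).

-- ===== PORT A =====
def ismultipleofThree (arr : List Int) : Int :=
  let even := (PySem.List.slice? arr (some 1) none 2).getD []   -- arr[1::2]; step ≠ 0, so slice? is never none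
  let odd := (PySem.List.slice? arr none none 2).getD []        -- arr[::2]
  let even := even.map (fun i => i)                             -- int(i) on an int is the identity
  let odd := odd.map (fun i => i)
  if PySem.Int.mod |even.sum - odd.sum| 3 == 0 then 1 else 0

-- ===== PORT B =====
def ismultipleofThree_alt (arr : List Int) : Int :=
  let total := (PySem.List.enumerate arr).foldl
    (fun t p => if PySem.Int.mod p.1 2 == 1 then t + p.2 else t - p.2) 0
  if PySem.Int.mod total 3 == 0 then 1 else 0

-- ===== PRECONDITION & SPEC =====
def Spec_ismultipleofThree (arr : List Int) (out : Int) : Prop := out = ismultipleofThree_alt arr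
instance (arr : List Int) (out : Int) : Decidable (Spec_ismultipleofThree arr out) := by unfold Spec_ismultipleofThree; infer_instance

-- ===== CLAIM (what is proved, stated in full; the proofs are below) =====
def Claim_equal_ismultipleofThree : Prop := ∀ (arr : List Int), Dom_ismultipleofThree arr → Spec_ismultipleofThree arr (ismultipleofThree arr)

-- ===== LEMMAS AND PROOFS =====

-- elements at even (resp. odd) positions, in order: arr[::2] and arr[1::2]
def pvEvens : List Int → List Int
  | [] => []
  | [a] => [a]
  | a :: _ :: r => a :: pvEvens r

def pvOdds : List Int → List Int
  | [] => []
  | [_] => []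
  | _ :: b :: r => b :: pvOdds r

theorem pvRange_every_two_zero : ∀ (xs : List Int),
    List.filterMap (fun k : Nat => xs[2 * k]?) (List.range ((xs.length + 1) / 2)) = pvEvens xs
  | [] => by simp [pvEvens]
  | [a] => by simp [pvEvens]
  | a :: b :: r => by
    have hlen : (a :: b :: r).length = r.length + 2 := by simp
    have hc : ((a :: b :: r).length + 1) / 2 = (r.length + 1) / 2 + 1 := by omega
    rw [hc, List.range_succ_eq_map, List.filterMap_cons, List.filterMap_map]
    have : (fun k : Nat => (a :: b :: r)[2 * k]?) ∘ Nat.succ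
         = (fun k : Nat => r[2 * k]?) := by
      funext k
      have h2 : 2 * Nat.succ k = 2 * k + 1 + 1 := by omega
      simp [h2, List.getElem?_cons_succ]
    simp only [this, pvRange_every_two_zero r]
    simp [pvEvens]

theorem pvRange_every_two_one : ∀ (xs : List Int),
    List.filterMap (fun k : Nat => xs[2 * k + 1]?) (List.range (xs.length / 2)) = pvOdds xs
  | [] => by simp [pvOdds]
  | [a] => by simp [pvOdds]
  | a :: b :: r => by
    have hc : (a :: b :: r).length / 2 = r.length / 2 + 1 := by simp; omega
    rw [hc, List.range_succ_eq_map, List.filterMap_cons, List.filterMap_map]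
    have : (fun k : Nat => (a :: b :: r)[2 * k + 1]?) ∘ Nat.succ
         = (fun k : Nat => r[2 * k + 1]?) := by
      funext k
      show (a :: b :: r)[2 * Nat.succ k + 1]? = r[2 * k + 1]?
      have h2 : 2 * Nat.succ k + 1 = 2 * k + 1 + 1 + 1 := by omega
      rw [h2, List.getElem?_cons_succ, List.getElem?_cons_succ]
    simp only [this, pvRange_every_two_one r]
    simp [pvOdds]

theorem slice_step2_evens (xs : List Int) :
    PySem.List.slice? xs none none 2 = some (pvEvens xs) := by
  have hidx : PySem.List.sliceIndices xs.length none none 2 = ((0 : Int), (xs.length : Int), 2) := by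
    simp [PySem.List.sliceIndices]
  rw [PySem.List.slice?]
  simp only [hidx, if_neg (by norm_num : ¬ (2:Int) = 0)]
  have hcnt : (if (0:Int) < (2:Int) then if (0:Int) < (xs.length:Int) then (((xs.length:Int) - 0 + 2 - 1) / 2).toNat else 0
      else if (xs.length:Int) < (0:Int) then (((0:Int) - xs.length + -2 - 1) / -2).toNat else 0)
      = (xs.length + 1) / 2 := by
    split_ifs with h1 h2 <;> omega
  have hfun : (fun k : Nat => xs[((0:Int) + 2 * (k:Int)).toNat]?) = (fun k : Nat => xs[2 * k]?) := by
    funext k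
    congr 1
    omega
  simp only [hcnt, hfun, pvRange_every_two_zero]

theorem slice_step2_odds (xs : List Int) :
    PySem.List.slice? xs (some 1) none 2 = some (pvOdds xs) := by
  cases xs with
  | nil => decide
  | cons a r =>
    have hidx : PySem.List.sliceIndices (a :: r).length (some 1) none 2
        = ((1 : Int), ((a :: r).length : Int), 2) := by
      simp [PySem.List.sliceIndices]
    rw [PySem.List.slice?]
    simp only [hidx, if_neg (by norm_num : ¬ (2:Int) = 0)]
    have hcnt : (if (0:Int) < (2:Int) then if (1:Int) < ((a :: r).length:Int) then ((((a :: r).length:Int) - 1 + 2 - 1) / 2).toNat else 0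
        else if ((a :: r).length:Int) < (1:Int) then (((1:Int) - (a :: r).length + -2 - 1) / -2).toNat else 0)
        = (a :: r).length / 2 := by
      simp only [List.length_cons]
      split_ifs with h1 h2 <;> omega
    have hfun : (fun k : Nat => (a :: r)[((1:Int) + 2 * (k:Int)).toNat]?) = (fun k : Nat => (a :: r)[2 * k + 1]?) := by
      funext k
      congr 1
      omega
    simp only [hcnt, hfun, pvRange_every_two_one]

theorem alt_fold : ∀ (xs : List Int) (t s : Int), PySem.Int.mod s 2 = 0 →
    (PySem.List.enumerate xs s).foldl
      (fun t p => if PySem.Int.mod p.1 2 == 1 then t + p.2 else t - p.2) t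
    = t + (pvOdds xs).sum - (pvEvens xs).sum
  | [], t, s, h => by simp [pvEvens, pvOdds, PySem.List.enumerate]
  | [a], t, s, h => by
    rw [PySem.Int.mod_eq_emod_of_pos (by omega)] at h
    have hs : ¬ ((PySem.Int.mod s 2 == 1) = true) := by
      rw [PySem.Int.mod_eq_emod_of_pos (by omega)]
      simp; omega
    rw [PySem.List.enumerate_cons]
    simp only [List.foldl_cons, if_neg hs]
    simp [PySem.List.enumerate, pvEvens, pvOdds]
  | a :: b :: r, t, s, h => by
    rw [PySem.Int.mod_eq_emod_of_pos (by omega)] at h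
    have hs : ¬ ((PySem.Int.mod s 2 == 1) = true) := by
      rw [PySem.Int.mod_eq_emod_of_pos (by omega)]; simp; omega
    have hs1 : (PySem.Int.mod (s + 1) 2 == 1) = true := by
      rw [PySem.Int.mod_eq_emod_of_pos (by omega)]; simp; omega
    have hs2 : PySem.Int.mod (s + 1 + 1) 2 = 0 := by
      rw [PySem.Int.mod_eq_emod_of_pos (by omega)]; omega
    rw [PySem.List.enumerate_cons, PySem.List.enumerate_cons]
    simp only [List.foldl_cons, if_neg hs, if_pos hs1]
    rw [alt_fold r (t - a + b) (s + 1 + 1) hs2]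
    simp [pvEvens, pvOdds]
    ring

theorem abs_mod3_cond (d : Int) : (PySem.Int.mod |d| 3 == 0) = (PySem.Int.mod d 3 == 0) := by
  by_cases h : (3:Int) ∣ d
  · have h1 : PySem.Int.mod |d| 3 = 0 := (PySem.Int.mod_eq_zero_iff_dvd _ _).mpr ((dvd_abs 3 d).mpr h)
    have h2 : PySem.Int.mod d 3 = 0 := (PySem.Int.mod_eq_zero_iff_dvd _ _).mpr h
    rw [h1, h2]
  · have h1 : ¬ PySem.Int.mod |d| 3 = 0 := fun hc => h ((dvd_abs 3 d).mp ((PySem.Int.mod_eq_zero_iff_dvd _ _).mp hc))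
    have h2 : ¬ PySem.Int.mod d 3 = 0 := fun hc => h ((PySem.Int.mod_eq_zero_iff_dvd _ _).mp hc)
    simp

-- ===== VERDICT (by name: the statement is the Claim_ definition above) =====
theorem ismultipleofThree_spec : Claim_equal_ismultipleofThree := by
  intro arr _
  unfold Spec_ismultipleofThree ismultipleofThree ismultipleofThree_alt
  rw [slice_step2_evens, slice_step2_odds]
  rw [alt_fold arr 0 0 (by decide)]
  simp only [Option.getD_some, List.map_id']
  rw [abs_mod3_cond]
  ring_nf
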